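-- pv_equiv track=rewrite | github.com/AdamZhouSE/pythonHomework | Code/CodeRecords/2178/60885/274553.py | findSub
-- ===== SOURCE A (Python) =====
-- def findSub(cards):
--     ans = 0
--     for i in range(1,len(cards)+1):
--         carry = set()
--         for j in range(len(cards)-i+1):
--             s = ''.join(cards[j:j+i])
--             carry.add(s)
--         ans += len(carry)
--     return ans
-- ===== SOURCE B (Python) =====
-- def findSub(cards):
--     n = len(cards)
--     lens = {}
--     for j in range(n):
--         s = ''
--         for k in range(j, n):
--             s = s + cards[k]
--             lens.setdefault(k - j + 1, set()).add(s)
--     return sum(len(v) for v in lens.values())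
-- ===== Notes on version B (the rewrite author's own statement) =====
-- stated objective: alternative
-- what changed: A makes one pass per window length, re-slicing and re-joining every window into a fresh per-length set; B makes a single start-major pass that grows each window string incrementally by one token and maintains one dict mapping window length to its set of distinct window strings, summing the set sizes at the end.
import Mathlib
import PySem

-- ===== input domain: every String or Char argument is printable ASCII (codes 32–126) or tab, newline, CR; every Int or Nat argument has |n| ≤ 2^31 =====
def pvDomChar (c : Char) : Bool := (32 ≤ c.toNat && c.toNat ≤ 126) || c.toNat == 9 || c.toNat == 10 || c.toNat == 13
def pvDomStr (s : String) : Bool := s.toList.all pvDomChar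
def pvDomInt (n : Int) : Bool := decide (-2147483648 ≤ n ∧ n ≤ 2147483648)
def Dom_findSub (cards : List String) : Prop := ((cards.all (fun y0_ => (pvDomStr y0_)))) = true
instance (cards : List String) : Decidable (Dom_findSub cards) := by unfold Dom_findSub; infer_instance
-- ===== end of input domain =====

-- B replaces A's length-major passes (one fresh set per window length, each window re-sliced and
-- re-joined) by a single start-major pass that grows each window string incrementally and maintains
-- one dict from window length to its set of distinct window strings; objective: alternative (same cost).

-- ===== PORT A =====
def findSub (cards : List String) : Int :=
  (PySem.List.pyRange 1 ((cards.length : Int) + 1) 1).foldl (fun ans i =>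
    let carry := (PySem.List.pyRange 0 ((cards.length : Int) - i + 1) 1).foldl
      (fun carry j =>
        PySem.Set.add carry (PySem.Str.join "" (PySem.List.slice cards (some j) (some (j + i)))))
      (PySem.Set.empty : PySem.Set String)
    ans + PySem.Set.len carry) 0

-- ===== PORT B =====
def findSub_alt (cards : List String) : Int :=
  let n : Int := cards.length
  let lens : PySem.Dict Int (PySem.Set String) :=
    (PySem.List.pyRange 0 n 1).foldl (fun lens j =>
      ((PySem.List.pyRange j n 1).foldl
        (fun (st : String × PySem.Dict Int (PySem.Set String)) k =>
          let s := st.1 ++ PySem.List.pyGetD cards k ""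
          (s, st.2.insert (k - j + 1)
                (PySem.Set.add (st.2.getD (k - j + 1) PySem.Set.empty) s)))
        ("", lens)).2)
      PySem.Dict.empty
  (lens.values.map PySem.Set.len).sum

-- ===== PRECONDITION & SPEC =====
def Spec_findSub (cards : List String) (out : Int) : Prop := out = findSub_alt cards
instance (cards : List String) (out : Int) : Decidable (Spec_findSub cards out) := by unfold Spec_findSub; infer_instance

-- ===== CLAIM (what is proved, stated in full; the proofs are below) =====
def Claim_equal_findSub : Prop := ∀ (cards : List String), Dom_findSub cards → Spec_findSub cards (findSub cards)

-- ===== LEMMAS AND PROOFS =====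

-- the window string cards[j:j+i] joined
def pvWin (cards : List String) (j i : Nat) : String :=
  PySem.Str.join "" ((cards.drop j).take i)

-- the windows of length i in start order (A's carry list for length i)
def pvCol (cards : List String) (i : Nat) : List String :=
  (List.range (cards.length - i + 1)).map (fun j => pvWin cards j i)

-- the common normal form of both answers
def pvSpecSum (cards : List String) : Int :=
  ((List.range cards.length).map
    (fun i => PySem.Set.len (PySem.Set.ofList (pvCol cards (i+1))))).sum

-- one dict update of B, as a function of one (length, window) event
def pvUpd (d : PySem.Dict Int (PySem.Set String)) (p : Int × String) :
    PySem.Dict Int (PySem.Set String) :=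
  d.insert p.1 (PySem.Set.add (d.getD p.1 PySem.Set.empty) p.2)

-- the tail of B's row j (windows starting at j) from column k on
def pvRowFrom (cards : List String) (j k : Nat) : List (Int × String) :=
  (List.range (cards.length - k)).map
    (fun t => (((k - j + t + 1 : Nat) : Int), pvWin cards j (k - j + t + 1)))

-- all of B's (length, window) events, in B's row-major order
def pvEvents (cards : List String) : List (Int × String) :=
  (List.range cards.length).flatMap (fun j => pvRowFrom cards j j)

-- the keys 1..n of B's dict, in insertion order
def pvKeys (cards : List String) : List Int :=
  (List.range cards.length).map (fun i => ((i + 1 : Nat) : Int))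

lemma pvJoinNil (css : List (List Char)) : PySem.Chars.join [] css = css.flatten := by
  induction css with
  | nil => rfl
  | cons c cs ih =>
    cases cs with
    | nil => simp [PySem.Chars.join_singleton]
    | cons d ds => rw [PySem.Chars.join_cons_cons]; simp at ih ⊢; simp [ih]

lemma pvJoinAppend (xs ys : List String) :
    PySem.Str.join "" (xs ++ ys) = PySem.Str.join "" xs ++ PySem.Str.join "" ys := by
  apply String.toList_inj.mp
  simp [PySem.Str.toList_join, pvJoinNil]

lemma pvJoinSingleton (y : String) : PySem.Str.join "" [y] = y := by
  apply String.toList_inj.mp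
  simp [PySem.Str.toList_join]

lemma pvWinSucc (cards : List String) (j k : Nat) (hj : j ≤ k) (hk : k < cards.length) :
    pvWin cards j (k - j) ++ PySem.List.pyGetD cards (k : Int) "" = pvWin cards j (k - j + 1) := by
  unfold pvWin
  rw [List.take_add_one]
  have h1 : (cards.drop j)[k - j]? = some cards[k] := by
    rw [List.getElem?_drop]
    rw [List.getElem?_eq_getElem (by omega)]
    congr 1; congr 1; omega
  rw [h1, pvJoinAppend]
  simp [pvJoinSingleton, PySem.List.pyGetD_natCast]
  simp [List.getElem?_eq_getElem (show k < cards.length by omega)]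

lemma pvUpdateSelf {l : List Int} {s : PySem.Set Int} (h : ∀ x ∈ l, x ∈ s) :
    PySem.Set.update s l = s := by
  induction l generalizing s with
  | nil => simp [PySem.Set.update_eq_foldl]
  | cons x l ih =>
    rw [PySem.Set.update_eq_foldl] at *
    simp only [List.foldl_cons]
    rw [PySem.Set.add_of_mem (h x (by simp))]
    exact ih (fun y hy => h y (by simp [hy]))

lemma pvRangeFilterEq (m i : Nat) :
    (List.range m).filter (fun t => t == i) = if i < m then [i] else [] := by
  induction m with
  | zero => simp
  | succ m ih =>
    rw [List.range_succ, List.filter_append, ih]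
    by_cases h : i < m
    · have h' : i < m + 1 := by omega
      have hne : ¬ (m == i) = true := by simp; omega
      simp [h, h', hne]
    · by_cases h2 : i = m
      · subst h2; simp
      · have h' : ¬ i < m + 1 := by omega
        have hne : ¬ (m == i) = true := by simp; omega
        simp [h, h', hne]

lemma pvRowFromCons (cards : List String) (j k : Nat) (hj : j ≤ k) (hk : k < cards.length) :
    pvRowFrom cards j k
      = (((k - j + 1 : Nat) : Int), pvWin cards j (k - j + 1)) :: pvRowFrom cards j (k + 1) := by
  unfold pvRowFrom
  have h : cards.length - k = (cards.length - (k + 1)) + 1 := by omega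
  rw [h, List.range_succ_eq_map]
  simp only [List.map_cons, List.map_map]
  refine congrArg₂ _ (by simp) ?_
  apply List.map_congr_left
  intro t ht
  have h1 : k - j + (t + 1) + 1 = k + 1 - j + t + 1 := by omega
  simp [Function.comp, h1]

lemma pvRowLemma (cards : List String) (j : Nat) : ∀ (m k : Nat), j ≤ k → cards.length - k = m →
    ∀ lens : PySem.Dict Int (PySem.Set String),
    ((PySem.List.pyRange (k : Int) (cards.length : Int) 1).foldl
        (fun (st : String × PySem.Dict Int (PySem.Set String)) kk =>
          let s := st.1 ++ PySem.List.pyGetD cards kk ""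
          (s, st.2.insert (kk - (j : Int) + 1)
                (PySem.Set.add (st.2.getD (kk - (j : Int) + 1) PySem.Set.empty) s)))
        (pvWin cards j (k - j), lens)).2
      = (pvRowFrom cards j k).foldl pvUpd lens := by
  intro m
  induction m with
  | zero =>
    intro k hj hm lens
    rw [PySem.List.pyRange_one_eq_nil (by omega : (cards.length : Int) ≤ (k : Int))]
    unfold pvRowFrom
    rw [hm]
    simp
  | succ m ih =>
    intro k hj hm lens
    have hk : k < cards.length := by omega
    rw [PySem.List.pyRange_one_cons (by exact_mod_cast hk), List.foldl_cons]
    have hkey : ((k : Int) - (j : Int) + 1) = ((k - j + 1 : Nat) : Int) := by omega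
    have hs := pvWinSucc cards j k hj hk
    have harg : k + 1 - j = k - j + 1 := by omega
    have hcast : ((k : Int) + 1) = ((k + 1 : Nat) : Int) := by omega
    rw [pvRowFromCons cards j k hj hk, List.foldl_cons]
    simp only [hkey, hs, hcast]
    have := ih (k + 1) (by omega) (by omega)
      (pvUpd lens (((k - j + 1 : Nat) : Int), pvWin cards j (k - j + 1)))
    rw [harg] at this
    rw [← this]
    rfl

lemma pvFoldAdd (f : Nat → String) (l : List Nat) :
    l.foldl (fun c t => PySem.Set.add c (f t)) (PySem.Set.empty : PySem.Set String)
      = PySem.Set.ofList (l.map f) := by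
  rw [PySem.Set.ofList_eq_foldl, List.foldl_map]; rfl

lemma pvA_eq (cards : List String) : findSub cards = pvSpecSum cards := by
  unfold findSub pvSpecSum
  have h0 : (((cards.length : Int) + 1) - 1).toNat = cards.length := by omega
  rw [PySem.List.pyRange_one, h0, List.foldl_map, PySem.List.foldl_add, zero_add]
  congr 1
  apply List.map_congr_left
  intro k hk
  rw [List.mem_range] at hk
  have hb : ((cards.length : Int) - (1 + (k : Int)) + 1) = ((cards.length - k : Nat) : Int) := by omega
  rw [hb, PySem.List.pyRange_zero, Int.toNat_natCast, List.foldl_map]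
  rw [pvFoldAdd]
  congr 1
  unfold pvCol
  have h1 : cards.length - (k + 1) + 1 = cards.length - k := by omega
  rw [h1]
  congr 1
  apply List.map_congr_left
  intro t ht
  have h2 : ((t : Int) + (1 + (k : Int))) = ((t : Int) + ((k + 1 : Nat) : Int)) := by omega
  rw [h2, PySem.List.slice_natCast_add]
  rfl

lemma pvWin_zero (cards : List String) (j : Nat) : pvWin cards j 0 = "" := by
  apply String.toList_inj.mp
  simp [pvWin, PySem.Str.toList_join]

lemma pvB_fold (cards : List String) :
    findSub_alt cards =
      (((pvEvents cards).foldl pvUpd PySem.Dict.empty).values.map PySem.Set.len).sum := by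
  simp only [findSub_alt]
  congr 2
  rw [PySem.List.pyRange_zero, List.foldl_map]
  unfold pvEvents
  rw [List.flatMap_def, List.foldl_flatten, List.foldl_map]
  have hn : ((cards.length : Int)).toNat = cards.length := by simp
  rw [hn]
  congr 1
  apply PySem.List.foldl_congr_mem
  have hfun : ∀ (lens : PySem.Dict Int (PySem.Set String)) (jn : Nat),
      ((PySem.List.pyRange (jn : Int) (cards.length : Int) 1).foldl
        (fun (st : String × PySem.Dict Int (PySem.Set String)) k =>
          (st.1 ++ PySem.List.pyGetD cards k "",
            st.2.insert (k - (jn : Int) + 1)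
              ((st.2.getD (k - (jn : Int) + 1) PySem.Set.empty).add
                (st.1 ++ PySem.List.pyGetD cards k ""))))
        ("", lens)).2 = (pvRowFrom cards jn jn).foldl pvUpd lens := by
    intro lens jn
    have h := pvRowLemma cards jn (cards.length - jn) jn le_rfl rfl lens
    rw [Nat.sub_self, pvWin_zero] at h
    exact h
  exact fun lens jn _ => hfun lens jn

lemma pvGetD_foldl (ev : List (Int × String)) :
    ∀ (d : PySem.Dict Int (PySem.Set String)) (c : Int),
    ((ev.foldl pvUpd d).getD c PySem.Set.empty)
      = PySem.Set.update (d.getD c PySem.Set.empty)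
          ((ev.filter (fun p => p.1 == c)).map (·.2)) := by
  induction ev with
  | nil => intro d c; simp [PySem.Set.update_eq_foldl]
  | cons p ev ih =>
    intro d c
    simp only [List.foldl_cons, List.filter_cons]
    by_cases h : p.1 = c
    · have hb : (p.1 == c) = true := by simp [h]
      simp only [hb, if_true, List.map_cons]
      rw [ih]
      unfold pvUpd
      rw [PySem.Dict.getD_insert]
      simp only [h]
      rw [PySem.Set.update_eq_foldl, PySem.Set.update_eq_foldl, List.foldl_cons]
      simp
    · have hb : (p.1 == c) = false := by simp [h]
      simp only [hb, Bool.false_eq_true, if_false]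
      rw [ih]
      unfold pvUpd
      rw [PySem.Dict.getD_insert]
      simp [Ne.symm h]

lemma pvOfList_append (xs ys : List Int) :
    PySem.Set.ofList (xs ++ ys) = PySem.Set.update (PySem.Set.ofList xs) ys := by
  rw [PySem.Set.ofList_eq_foldl, List.foldl_append, ← PySem.Set.ofList_eq_foldl,
    ← PySem.Set.update_eq_foldl]

lemma pvKeys_nodup (cards : List String) : (pvKeys cards).Nodup := by
  unfold pvKeys
  apply List.Nodup.map _ List.nodup_range
  intro a b hab
  have hab' : ((a + 1 : Nat) : Int) = ((b + 1 : Nat) : Int) := hab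
  omega

lemma pvKeysListEq (n : Nat) :
    PySem.Set.ofList
        ((List.range n).flatMap (fun j => (List.range (n - j)).map (fun t => ((t + 1 : Nat) : Int))))
      = (List.range n).map (fun t => ((t + 1 : Nat) : Int)) := by
  cases n with
  | zero => simp
  | succ n' =>
    rw [List.range_succ_eq_map, List.flatMap_cons]
    simp only [Nat.sub_zero]
    rw [pvOfList_append]
    have hnd : ((List.range (n' + 1)).map (fun t => ((t + 1 : Nat) : Int))).Nodup := by
      apply List.Nodup.map _ List.nodup_range
      intro a b hab
      have hab' : ((a + 1 : Nat) : Int) = ((b + 1 : Nat) : Int) := hab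
      omega
    rw [PySem.Set.ofList_eq_self_of_nodup _ hnd]
    conv_rhs => rw [← List.range_succ_eq_map]
    apply pvUpdateSelf
    intro x hx
    simp only [List.mem_flatMap, List.mem_map, List.mem_range] at hx
    obtain ⟨j, ⟨j', hj', rfl⟩, t, ht, rfl⟩ := hx
    simp only [List.mem_map, List.mem_range]
    exact ⟨t, by omega, rfl⟩

lemma pvKeys_eq (cards : List String) :
    PySem.Set.ofList ((pvEvents cards).map (·.1)) = pvKeys cards := by
  have hfst : (pvEvents cards).map (·.1)
      = (List.range cards.length).flatMap
          (fun j => (List.range (cards.length - j)).map (fun t => ((t + 1 : Nat) : Int))) := by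
    unfold pvEvents pvRowFrom
    rw [List.map_flatMap]
    apply List.flatMap_congr
    intro j _
    rw [List.map_map]
    apply List.map_congr_left
    intro t _
    simp
  rw [hfst]
  exact pvKeysListEq cards.length

lemma pvFlatMapPrefix (g : Nat → String) (m n : Nat) (hm : m ≤ n) :
    (List.range n).flatMap (fun j => if j < m then [g j] else []) = (List.range m).map g := by
  have h : n = m + (n - m) := by omega
  rw [h, List.range_add, List.flatMap_append]
  have h1 : (List.range m).flatMap (fun j => if j < m then [g j] else [])
      = (List.range m).map g := by
    calc (List.range m).flatMap (fun j => if j < m then [g j] else [])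
        = (List.range m).flatMap (fun j => [g j]) :=
          List.flatMap_congr (fun j hj => by rw [List.mem_range] at hj; rw [if_pos hj])
      _ = (List.range m).map g := (List.map_eq_flatMap).symm
  have h2 : ((List.range (n - m)).map (fun x => m + x)).flatMap
      (fun j => if j < m then [g j] else []) = [] := by
    apply List.flatMap_eq_nil_iff.mpr
    intro j hj
    simp only [List.mem_map] at hj
    obtain ⟨x, _, rfl⟩ := hj
    rw [if_neg (by omega)]
  rw [h1, h2, List.append_nil]

lemma pvFiltered_eq (cards : List String) (i : Nat) (hi : i < cards.length) :
    ((pvEvents cards).filter (fun p => p.1 == ((i + 1 : Nat) : Int))).map (·.2)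
      = pvCol cards (i + 1) := by
  unfold pvEvents
  rw [List.filter_flatMap, List.map_flatMap]
  have hrow : ∀ j ∈ List.range cards.length,
      ((pvRowFrom cards j j).filter (fun p => p.1 == ((i + 1 : Nat) : Int))).map (·.2)
        = if j < cards.length - i then [pvWin cards j (i + 1)] else [] := by
    intro j _
    unfold pvRowFrom
    rw [List.filter_map]
    have hcomp : ((fun p : Int × String => p.1 == ((i + 1 : Nat) : Int)) ∘
        (fun t => (((j - j + t + 1 : Nat) : Int), pvWin cards j (j - j + t + 1))))
        = fun t => t == i := by
      funext t
      simp only [Function.comp_apply, Nat.sub_self, Nat.zero_add]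
      by_cases ht : t = i
      · simp [ht]
      · have h1 : (((t + 1 : Nat) : Int) == ((i + 1 : Nat) : Int)) = false := by
          simp only [beq_eq_false_iff_ne, ne_eq]
          intro hc
          apply ht
          omega
        have h2 : (t == i) = false := by simp [ht]
        rw [h1, h2]
    rw [hcomp, pvRangeFilterEq]
    by_cases hj : i < cards.length - j
    · rw [if_pos hj, if_pos (by omega)]
      simp only [List.map_cons, List.map_nil]
      have harg : j - j + i + 1 = i + 1 := by omega
      rw [harg]
    · rw [if_neg hj, if_neg (by omega)]
      simp
  rw [List.flatMap_congr hrow]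
  have hcond : ∀ j ∈ List.range cards.length,
      (if j < cards.length - i then [pvWin cards j (i + 1)] else [])
        = (fun j => if j < cards.length - i then [(fun j => pvWin cards j (i + 1)) j] else []) j := by
    intro j _; rfl
  rw [List.flatMap_congr hcond, pvFlatMapPrefix _ _ _ (by omega)]
  unfold pvCol
  have : cards.length - (i + 1) + 1 = cards.length - i := by omega
  rw [this]

lemma pvUpdateEmpty (l : List String) :
    PySem.Set.update (PySem.Set.empty : PySem.Set String) l = PySem.Set.ofList l := by
  rw [PySem.Set.update_eq_foldl, PySem.Set.ofList_eq_foldl]; rfl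

lemma pvB_eq (cards : List String) : findSub_alt cards = pvSpecSum cards := by
  rw [pvB_fold]
  have hkeys : ((pvEvents cards).foldl pvUpd PySem.Dict.empty).keys = pvKeys cards := by
    have h := PySem.Dict.keys_foldl_insert_key (pvEvents cards) (fun p : Int × String => p.1)
      (fun d (p : Int × String) => PySem.Set.add (d.getD p.1 PySem.Set.empty) p.2) PySem.Dict.empty
    rw [PySem.Dict.keys_empty] at h
    rw [show (pvEvents cards).foldl pvUpd PySem.Dict.empty
        = List.foldl (fun (d : PySem.Dict Int (PySem.Set String)) (x : Int × String) =>
            d.insert ((fun p : Int × String => p.1) x)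
              ((fun d (p : Int × String) => PySem.Set.add (d.getD p.1 PySem.Set.empty) p.2) d x))
            PySem.Dict.empty (pvEvents cards) from rfl, h,
      PySem.Set.update_eq_foldl, ← PySem.Set.ofList_eq_foldl]
    exact pvKeys_eq cards
  have hnd : ((pvEvents cards).foldl pvUpd PySem.Dict.empty).keys.Nodup := by
    rw [hkeys]; exact pvKeys_nodup cards
  rw [PySem.Dict.values_eq_map_keys _ hnd PySem.Set.empty, hkeys]
  unfold pvKeys pvSpecSum
  rw [List.map_map, List.map_map]
  congr 1
  apply List.map_congr_left
  intro i hi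
  rw [List.mem_range] at hi
  simp only [Function.comp_apply]
  rw [pvGetD_foldl, PySem.Dict.getD_empty, pvUpdateEmpty, pvFiltered_eq cards i hi]

-- ===== VERDICT (by name: the statement is the Claim_ definition above) =====
theorem findSub_spec : Claim_equal_findSub := by
  intro cards _
  unfold Spec_findSub
  rw [pvA_eq, pvB_eq]
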